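-- pv_equiv track=rewrite | github.com/nishio/atcoder | arc019_2.py | solve
-- ===== SOURCE A (Python) =====
-- def solve(S):
--     ret = 0
--     N = len(S)
--     if N == 1:
--         return 0
--     xs = [S[i] != S[-1-i] for i in range(N // 2)]
--     sums = sum(xs)
--     for x in xs:
--         if x:
--             if sums == 1:
--                 ret += 24 * 2
--             else:
--                 ret += 25 * 2
--         else:
--             ret += 25 * 2
--     if N & 1:
--         if sums != 0:
--             ret += 25
--     return ret
-- ===== SOURCE B (Python) =====
-- def solve(S):
--     n = len(S)
--     p = n // 2
--     m = sum(S[i] != S[n - 1 - i] for i in range(p))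
--     return 50 * p - (2 if m == 1 else 0) + (25 if n % 2 == 1 and m != 0 else 0)
-- ===== Notes on version B (the rewrite author's own statement) =====
-- stated objective: simpler
-- what changed: Replaces A's per-pair accumulation loop (plus the N==1 early return) with a direct closed-form formula over two scalars: the pair count p = n//2 and the mismatch count m, returning 50*p - 2*[m==1] + 25*[n odd and m!=0].
import Mathlib
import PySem

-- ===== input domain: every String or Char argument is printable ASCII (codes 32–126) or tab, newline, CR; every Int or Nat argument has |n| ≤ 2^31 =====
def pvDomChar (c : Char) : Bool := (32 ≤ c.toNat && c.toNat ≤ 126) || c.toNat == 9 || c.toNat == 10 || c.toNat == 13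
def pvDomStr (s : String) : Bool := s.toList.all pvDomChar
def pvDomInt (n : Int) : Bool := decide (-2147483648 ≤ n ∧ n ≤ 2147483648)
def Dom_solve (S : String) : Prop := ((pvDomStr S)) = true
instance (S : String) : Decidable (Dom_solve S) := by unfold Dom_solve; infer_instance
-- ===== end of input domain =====

-- B replaces A's per-pair accumulation loop with a closed-form formula over the
-- pair count p = n//2 and the mismatch count m (objective: simpler).


-- ===== PORT A =====
def solve (S : String) : Int :=
  let ret : Int := 0
  let l := S.toList
  let N : Int := l.length
  if N = 1 then 0
  else
    let xs : List Bool := (PySem.List.pyRange 0 (PySem.Int.floordiv N 2) 1).map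
      (fun i => decide (PySem.List.pyGetD l i ' ' ≠ PySem.List.pyGetD l (-1 - i) ' '))
    let sums : Int := xs.count true
    let ret := xs.foldl
      (fun r x => if x then (if sums = 1 then r + 24 * 2 else r + 25 * 2) else r + 25 * 2) ret
    if PySem.Int.band N 1 ≠ 0 then (if sums ≠ 0 then ret + 25 else ret) else ret

-- ===== PORT B =====
def solve_alt (S : String) : Int :=
  let l := S.toList
  let n : Int := l.length
  let p := PySem.Int.floordiv n 2
  let m : Int := ((PySem.List.pyRange 0 p 1).map
      (fun i => decide (PySem.List.pyGetD l i ' ' ≠ PySem.List.pyGetD l (n - 1 - i) ' '))).count true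
  50 * p - (if m = 1 then 2 else 0) + (if PySem.Int.mod n 2 = 1 ∧ m ≠ 0 then 25 else 0)

-- ===== PRECONDITION & SPEC =====
def Spec_solve (S : String) (out : Int) : Prop := out = solve_alt S
instance (S : String) (out : Int) : Decidable (Spec_solve S out) := by unfold Spec_solve; infer_instance

-- ===== CLAIM (what is proved, stated in full; the proofs are below) =====
def Claim_equal_solve : Prop := ∀ (S : String), Dom_solve S → Spec_solve S (solve S)

-- ===== LEMMAS AND PROOFS =====

-- A negative index -1-i reads the same element as the nonnegative index n-1-i.
lemma pyGetD_neg_eq (l : List Char) (i : Int) (h0 : 0 ≤ i) (h1 : i < (l.length : Int)) :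
    PySem.List.pyGetD l (-1 - i) ' ' = PySem.List.pyGetD l ((l.length : Int) - 1 - i) ' ' := by
  rw [PySem.List.pyGetD_eq_getElem (i := (l.length : Int) - 1 - i) (h0 := by omega) (h1 := by omega)]
  unfold PySem.List.pyGetD PySem.List.pyGet? PySem.List.pyIdx?
  rw [if_neg (by omega), if_pos (by omega)]
  have hk : l.length - (-(-1 - i)).toNat = ((l.length : Int) - 1 - i).toNat := by omega
  rw [hk]
  simp [List.getElem?_eq_getElem (by omega : ((l.length : Int) - 1 - i).toNat < l.length)]

-- A's accumulation loop in closed form: 50 per element, minus 2 per true element when s = 1.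
lemma loopA (s : Int) (xs : List Bool) (acc : Int) :
    xs.foldl (fun r x => if x then (if s = 1 then r + 24 * 2 else r + 25 * 2) else r + 25 * 2) acc
      = acc + 50 * xs.length - (if s = 1 then 2 * (xs.count true : Int) else 0) := by
  induction xs generalizing acc with
  | nil => simp
  | cons x t ih =>
    rw [List.foldl_cons, ih]
    cases x with
    | false => simp; ring
    | true => simp; split_ifs <;> omega

theorem solve_spec : Claim_equal_solve := by
  intro S _
  simp only [Spec_solve, solve, solve_alt]
  set l := S.toList with hl
  have hn0 : (0 : Int) ≤ (l.length : Int) := by positivity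
  by_cases hN : (l.length : Int) = 1
  · -- N = 1: A returns 0 early; B's formula also gives 0 (p = 0, m = 0, bonus condition false).
    have hP0 : PySem.Int.floordiv (1 : Int) 2 = 0 := by decide
    have hM0 : PySem.Int.mod (1 : Int) 2 = 1 := by decide
    rw [hN, if_pos rfl, hP0, hM0, PySem.List.pyRange_one_eq_nil (by omega)]
    norm_num
  · rw [if_neg hN]
    have hP : PySem.Int.floordiv (l.length : Int) 2 = (l.length : Int) / 2 :=
      PySem.Int.floordiv_eq_ediv_of_pos (by omega)
    -- the two comprehension lists are equal
    have hxs : (PySem.List.pyRange 0 (PySem.Int.floordiv (l.length : Int) 2) 1).map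
          (fun i => decide (PySem.List.pyGetD l i ' ' ≠ PySem.List.pyGetD l (-1 - i) ' '))
        = (PySem.List.pyRange 0 (PySem.Int.floordiv (l.length : Int) 2) 1).map
          (fun i => decide (PySem.List.pyGetD l i ' ' ≠ PySem.List.pyGetD l ((l.length : Int) - 1 - i) ' ')) := by
      apply List.map_congr_left
      intro i hi
      rw [PySem.List.mem_pyRange_one] at hi
      rw [pyGetD_neg_eq l i hi.1 (by omega)]
    rw [hxs]
    set xs := (PySem.List.pyRange 0 (PySem.Int.floordiv (l.length : Int) 2) 1).map
      (fun i => decide (PySem.List.pyGetD l i ' ' ≠ PySem.List.pyGetD l ((l.length : Int) - 1 - i) ' ')) with hxsdef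
    set m : Int := (xs.count true : Int) with hm
    have hlen : (xs.length : Int) = PySem.Int.floordiv (l.length : Int) 2 := by
      rw [hxsdef]
      simp [PySem.List.length_pyRange_one]
      omega
    rw [loopA m xs 0, hlen]
    have hcount : m = 1 → (xs.count true : Int) = 1 := fun h => h
    have hband : PySem.Int.band (l.length : Int) 1 = PySem.Int.mod (l.length : Int) 2 :=
      PySem.Int.band_one _
    have hmod : PySem.Int.mod (l.length : Int) 2 = (l.length : Int) % 2 :=
      PySem.Int.mod_eq_emod_of_pos (by omega)
    rw [hband, hmod]
    have hmnonneg : 0 ≤ m := by positivity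
    split_ifs <;> omega
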